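-- pv_equiv track=rewrite | github.com/ianchesal/careercup.com | frontbacksort.py | _move_forward
-- ===== SOURCE A (Python) =====
-- def _move_forward(array, i):
-- 	'''
-- 	Move the value at position i in the array forward, swapping
-- 	with values ahead of it as you go, until the value ahead of
-- 	it is a positive integer value. Return True if you had to
-- 	move something, false if you didn't have to move something.
--
-- 	The array is changed in place.
--
-- 	>>> a = [1, -2, 3]
-- 	>>> _move_forward(a, 0)
-- 	True
-- 	>>> print a
-- 	[-2, 1, 3]
-- 	>>> a = [1, 2, -3]
-- 	>>> _move_forward(a, 0)
-- 	False
-- 	>>> print a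
-- 	[1, 2, -3]
-- 	>>> a = [1, 2, -3]
-- 	>>> _move_forward(a, -1)
-- 	False
-- 	>>> print a
-- 	[1, 2, -3]
-- 	>>> a = [1, 2, -3]
-- 	>>> _move_forward(a, 3)
-- 	False
-- 	>>> print a
-- 	[1, 2, -3]
-- 	>>> a = [1, -2, -3]
-- 	>>> _move_forward(a, 0)
-- 	True
-- 	>>> print a
-- 	[-2, -3, 1]
-- 	>>> a = [1, 2, 3]
-- 	>>> _move_forward(a, 2)
-- 	False
-- 	>>> print a
-- 	[1, 2, 3]
-- 	>>> a = [1, 2]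
-- 	>>> _move_forward(a, 3)
-- 	False
-- 	>>> print a
-- 	[1, 2]
-- 	>>> a = [1, 2, 3]
-- 	>>> _move_forward(a, 2)
-- 	False
-- 	>>> print a
-- 	[1, 2, 3]
-- 	'''
-- 	done_moves = False
-- 	made_moves = False
-- 	if i < 0 or i >= len(array):
-- 		# Bad input. We're done.
-- 		done_moves = True
-- 	while i < len(array)-1 and not done_moves:
-- 		if array[i+1] < 0:
-- 			# Move it forward one more spot
-- 			t = array[i]
-- 			array[i] = array[i+1]
-- 			array[i+1] = t
-- 			i = i + 1
-- 			made_moves = True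
-- 		else:
-- 			# We're done. The next number is positive so we
-- 			# need to stop moving this value foward.
-- 			done_moves = True
-- 	return made_moves
-- ===== SOURCE B (Python) =====
-- def _move_forward(array, i):
--     if i < 0 or i >= len(array):
--         return False
--     j = i + 1
--     while j < len(array) and array[j] < 0:
--         j += 1
--     array[i:j] = array[i + 1:j] + [array[i]]
--     return j > i + 1
-- ===== Notes on version B (the rewrite author's own statement) =====
-- stated objective: simpler
-- what changed: A repeatedly swaps the element one slot forward inside a while loop with done/made flags; B scans for the first non-negative index j without mutating, performs the whole move as one slice rotation, and returns j > i+1.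
import Mathlib
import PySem

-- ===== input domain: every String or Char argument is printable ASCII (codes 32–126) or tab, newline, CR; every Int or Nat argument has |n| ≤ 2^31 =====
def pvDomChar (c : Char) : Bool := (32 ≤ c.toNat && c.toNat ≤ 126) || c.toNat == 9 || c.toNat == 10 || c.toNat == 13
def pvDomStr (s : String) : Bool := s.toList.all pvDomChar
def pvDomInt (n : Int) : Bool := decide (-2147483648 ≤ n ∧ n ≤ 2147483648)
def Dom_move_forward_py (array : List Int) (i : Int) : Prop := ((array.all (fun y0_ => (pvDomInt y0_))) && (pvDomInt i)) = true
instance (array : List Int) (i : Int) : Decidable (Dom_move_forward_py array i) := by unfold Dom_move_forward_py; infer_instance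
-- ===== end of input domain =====

-- B replaces A's in-place swap loop with a scan for the first non-negative plus one slice rotation
-- (objective: simpler). Both A and B mutate the Python list in place identically; the equivalence
-- proved here is about the returned Bool only.


-- ===== PORT A =====
-- A's while loop: swap array[i]/array[i+1] while the next element is negative; the swap is
-- transliterated via List.set, and the loop is recursion on the same mutable state (arr, i, made).
def moveLoopA (arr : List Int) (i : Nat) (made : Bool) : Bool :=
  if h : i < arr.length - 1 then
    if arr.getD (i+1) 0 < 0 then
      moveLoopA ((arr.set i (arr.getD (i+1) 0)).set (i+1) (arr.getD i 0)) (i+1) true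
    else made
  else made
termination_by arr.length - i
decreasing_by simp [List.length_set]; omega

def move_forward_py (array : List Int) (i : Int) : Bool :=
  if i < 0 || i ≥ (array.length : Int) then false   -- done_moves = True on bad input; loop never runs
  else moveLoopA array i.toNat false

-- ===== PORT B =====
-- B's scan: j = i+1; while j < len and array[j] < 0: j += 1; return j > i+1.
def scanB (arr : List Int) (j : Nat) : Nat :=
  if h : j < arr.length then
    if arr.getD j 0 < 0 then scanB arr (j+1) else j
  else j
termination_by arr.length - j

def move_forward_py_alt (array : List Int) (i : Int) : Bool :=
  if i < 0 || i ≥ (array.length : Int) then false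
  else decide (scanB array (i.toNat + 1) > i.toNat + 1)

-- ===== PRECONDITION & SPEC =====
def Spec_move_forward_py (array : List Int) (i : Int) (out : Bool) : Prop := out = move_forward_py_alt array i
instance (array : List Int) (i : Int) (out : Bool) : Decidable (Spec_move_forward_py array i out) := by unfold Spec_move_forward_py; infer_instance

-- ===== CLAIM (what is proved, stated in full; the proofs are below) =====
def Claim_equal_move_forward_py : Prop := ∀ (array : List Int) (i : Int), Dom_move_forward_py array i → Spec_move_forward_py array i (move_forward_py array i)

-- ===== LEMMAS AND PROOFS =====

-- once made = true, A's loop returns true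
theorem moveLoopA_true (arr : List Int) (i : Nat) : moveLoopA arr i true = true := by
  unfold moveLoopA
  split
  · split
    · exact moveLoopA_true _ _
    · rfl
  · rfl
termination_by arr.length - i
decreasing_by simp [List.length_set]; omega

-- with made = false, A's loop returns true iff the first step fires
theorem moveLoopA_false (arr : List Int) (i : Nat) :
    moveLoopA arr i false = decide (i < arr.length - 1 ∧ arr.getD (i+1) 0 < 0) := by
  unfold moveLoopA
  split <;> rename_i h
  · split <;> rename_i h2
    · rw [moveLoopA_true]
      exact (decide_eq_true ⟨h, h2⟩).symm
    · exact (decide_eq_false (fun hc => h2 hc.2)).symm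
  · exact (decide_eq_false (fun hc => h hc.1)).symm

theorem scanB_le (arr : List Int) (j : Nat) : j ≤ scanB arr j := by
  unfold scanB
  split
  · split
    · exact le_trans (Nat.le_succ j) (scanB_le arr (j+1))
    · exact le_refl j
  · exact le_refl j
termination_by arr.length - j

theorem scanB_gt (arr : List Int) (j : Nat) :
    scanB arr j > j ↔ j < arr.length ∧ arr.getD j 0 < 0 := by
  conv_lhs => rw [scanB]
  split <;> rename_i h
  · split <;> rename_i h2
    · exact iff_of_true (lt_of_lt_of_le (Nat.lt_succ_self j) (scanB_le arr (j+1))) ⟨h, h2⟩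
    · exact iff_of_false (lt_irrefl j) (fun hc => h2 hc.2)
  · exact iff_of_false (lt_irrefl j) (fun hc => h hc.1)

-- ===== VERDICT (by name: the statement is the Claim_ definition above) =====
theorem move_forward_py_spec : Claim_equal_move_forward_py := by
  intro array i _
  unfold Spec_move_forward_py move_forward_py move_forward_py_alt
  split
  · rfl
  · rename_i h
    rw [moveLoopA_false]
    simp only [decide_eq_decide]
    rw [scanB_gt]
    constructor <;> rintro ⟨h1, h2⟩ <;> exact ⟨by omega, h2⟩
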